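-- pv_equiv track=rewrite | github.com/wshuai294/sci_network | pi_coauthor_network.py | build_author_regions
-- ===== SOURCE A (Python) =====
-- from collections import defaultdict
--
-- _REGION_KEYWORDS = {
--     "China": ["China", "Chinese", "Beijing", "Shanghai", "Hong Kong", "Fudan", "Tsinghua", "Zhejiang", "Wuhan", "Nanjing", "CAS", "Peking", "Huazhong", "Nankai"],
--     "US": ["USA", "U.S.A", "United States", "America", "Harvard", "Stanford", "MIT", "Yale", "Columbia", "California", "Berkeley", "Michigan", "Cornell", "Duke", "Texas", "Washington", "Chicago", "Boston", "U.S."],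
--     "UK": ["UK", "U.K", "United Kingdom", "England", "Oxford", "Cambridge", "London", "Edinburgh", "Imperial", "UCL", "Bristol", "Leeds", "Glasgow"],
--     "Europe": ["Germany", "French", "France", "Netherlands", "Switzerland", "Sweden", "Denmark", "Italy", "Spain", "Munich", "Berlin", "Paris", "Amsterdam", "Zurich", "ETH", "Max Planck", "CNRS", "INSERM", "Karolinska", "Vienna"],
--     "Japan": ["Japan", "Japanese", "Tokyo", "Kyoto", "Osaka", "Waseda", "Tohoku", "Riken"],
--     "Australia": ["Australia", "Australian", "Sydney", "Melbourne", "Brisbane", "Perth", "Adelaide", "Canberra", "Queensland", "New South Wales", "Monash", "UNSW", "University of Sydney", "University of Melbourne"],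
--     "Canada": ["Canada", "Canadian", "Toronto", "Vancouver", "Montreal", "McGill", "British Columbia", "UBC", "Alberta", "Ontario", "Quebec", "Calgary", "Waterloo", "University of Toronto"],
-- }
--
-- def _affiliation_to_region(aff_text: str) -> str:
--     """Infer region from affiliation string. Returns China, US, UK, Europe, Japan, Australia, Canada, or Others."""
--     if not aff_text:
--         return "Others"
--     lower = aff_text.lower()
--     for region, keywords in _REGION_KEYWORDS.items():
--         for kw in keywords:
--             if kw.lower() in lower:
--                 return region
--     return "Others"
--
-- def build_author_regions(records: list[dict]) -> dict[str, str]: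
--     """From author_affiliations in records, infer region per author (majority vote)."""
--     from collections import Counter
--     author_affs = defaultdict(list)
--     for rec in records:
--         for name, affs in rec.get("author_affiliations", []):
--             if name:
--                 author_affs[name].extend(affs)
--     author_region = {}
--     for author, affs in author_affs.items():
--         regions = [_affiliation_to_region(a) for a in affs if a]
--         regions = [r for r in regions if r != "Others"]
--         if not regions:
--             author_region[author] = "Others"
--         else:
--             author_region[author] = Counter(regions).most_common(1)[0][0]
--     return author_region
-- ===== SOURCE B (Python) =====
-- _REGION_KEYWORDS = {
--     "China": ["China", "Chinese", "Beijing", "Shanghai", "Hong Kong", "Fudan", "Tsinghua", "Zhejiang", "Wuhan", "Nanjing", "CAS", "Peking", "Huazhong", "Nankai"],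
--     "US": ["USA", "U.S.A", "United States", "America", "Harvard", "Stanford", "MIT", "Yale", "Columbia", "California", "Berkeley", "Michigan", "Cornell", "Duke", "Texas", "Washington", "Chicago", "Boston", "U.S."],
--     "UK": ["UK", "U.K", "United Kingdom", "England", "Oxford", "Cambridge", "London", "Edinburgh", "Imperial", "UCL", "Bristol", "Leeds", "Glasgow"],
--     "Europe": ["Germany", "French", "France", "Netherlands", "Switzerland", "Sweden", "Denmark", "Italy", "Spain", "Munich", "Berlin", "Paris", "Amsterdam", "Zurich", "ETH", "Max Planck", "CNRS", "INSERM", "Karolinska", "Vienna"],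
--     "Japan": ["Japan", "Japanese", "Tokyo", "Kyoto", "Osaka", "Waseda", "Tohoku", "Riken"],
--     "Australia": ["Australia", "Australian", "Sydney", "Melbourne", "Brisbane", "Perth", "Adelaide", "Canberra", "Queensland", "New South Wales", "Monash", "UNSW", "University of Sydney", "University of Melbourne"],
--     "Canada": ["Canada", "Canadian", "Toronto", "Vancouver", "Montreal", "McGill", "British Columbia", "UBC", "Alberta", "Ontario", "Quebec", "Calgary", "Waterloo", "University of Toronto"],
-- }
--
-- _REGION_NAMES = list(_REGION_KEYWORDS)
-- _LOWER_KEYWORDS = [[kw.lower() for kw in kws] for kws in _REGION_KEYWORDS.values()]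
--
-- def _region_index(aff_text):
--     """Index of the region an affiliation votes for, or -1 for no vote (empty / unrecognised)."""
--     if not aff_text:
--         return -1
--     lower = aff_text.lower()
--     for i, kws in enumerate(_LOWER_KEYWORDS):
--         if any(kw in lower for kw in kws):
--             return i
--     return -1
--
-- def build_author_regions(records):
--     """Dense tally: per author a fixed 7-slot count array plus the rank of each
--     region's first vote; the winner is the explicit argmax by (count, -first rank)."""
--     tallies = {}  # name -> (counts[7], firsts[7], nvotes) as a mutable 3-list
--     for rec in records:
--         for name, affs in rec.get("author_affiliations", []):
--             if not name:
--                 continue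
--             t = tallies.get(name)
--             if t is None:
--                 t = [[0] * 7, [0] * 7, 0]
--                 tallies[name] = t
--             counts, firsts = t[0], t[1]
--             for a in affs:
--                 i = _region_index(a)
--                 if i < 0:
--                     continue
--                 if counts[i] == 0:
--                     firsts[i] = t[2]
--                 counts[i] += 1
--                 t[2] += 1
--     out = {}
--     for name, (counts, firsts, _n) in tallies.items():
--         best = -1
--         for i in range(7):
--             if counts[i] == 0:
--                 continue
--             if best < 0 or counts[i] > counts[best] or \
--                (counts[i] == counts[best] and firsts[i] < firsts[best]):
--                 best = i
--         out[name] = _REGION_NAMES[best] if best >= 0 else "Others"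
--     return out
-- ===== Notes on version B (the rewrite author's own statement) =====
-- stated objective: alternative
-- what changed: B drops A's per-author affiliation lists, Counter and most_common entirely: it keeps a dense fixed 7-slot count array per author plus the rank of each region's first vote, filled in one fused pass, and picks the winner by an explicit argmax over the 7 slots keyed by (count, -first-vote rank).
import Mathlib
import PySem

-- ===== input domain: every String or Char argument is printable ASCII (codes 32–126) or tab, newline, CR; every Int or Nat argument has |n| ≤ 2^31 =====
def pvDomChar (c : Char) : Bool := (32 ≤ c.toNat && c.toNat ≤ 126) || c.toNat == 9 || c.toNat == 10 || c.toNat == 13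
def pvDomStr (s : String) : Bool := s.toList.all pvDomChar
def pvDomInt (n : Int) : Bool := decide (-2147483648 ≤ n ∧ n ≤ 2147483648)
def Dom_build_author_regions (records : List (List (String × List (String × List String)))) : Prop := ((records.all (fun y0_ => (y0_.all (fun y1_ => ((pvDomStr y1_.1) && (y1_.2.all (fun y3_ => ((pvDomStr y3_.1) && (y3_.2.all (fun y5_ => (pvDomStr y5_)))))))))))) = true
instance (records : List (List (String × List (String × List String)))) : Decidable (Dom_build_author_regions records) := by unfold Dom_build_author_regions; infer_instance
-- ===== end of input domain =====

-- B replaces A's per-author affiliation lists + Counter + most_common by dense 7-slot tally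
-- arrays with first-vote ranks and an explicit keyed argmax (objective: alternative, same cost).

-- shared same-module helper _affiliation_to_region (used verbatim by A)
def regionKeywords : List (String × List String) :=
  [("China", ["China", "Chinese", "Beijing", "Shanghai", "Hong Kong", "Fudan", "Tsinghua", "Zhejiang", "Wuhan", "Nanjing", "CAS", "Peking", "Huazhong", "Nankai"]),
   ("US", ["USA", "U.S.A", "United States", "America", "Harvard", "Stanford", "MIT", "Yale", "Columbia", "California", "Berkeley", "Michigan", "Cornell", "Duke", "Texas", "Washington", "Chicago", "Boston", "U.S."]),
   ("UK", ["UK", "U.K", "United Kingdom", "England", "Oxford", "Cambridge", "London", "Edinburgh", "Imperial", "UCL", "Bristol", "Leeds", "Glasgow"]),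
   ("Europe", ["Germany", "French", "France", "Netherlands", "Switzerland", "Sweden", "Denmark", "Italy", "Spain", "Munich", "Berlin", "Paris", "Amsterdam", "Zurich", "ETH", "Max Planck", "CNRS", "INSERM", "Karolinska", "Vienna"]),
   ("Japan", ["Japan", "Japanese", "Tokyo", "Kyoto", "Osaka", "Waseda", "Tohoku", "Riken"]),
   ("Australia", ["Australia", "Australian", "Sydney", "Melbourne", "Brisbane", "Perth", "Adelaide", "Canberra", "Queensland", "New South Wales", "Monash", "UNSW", "University of Sydney", "University of Melbourne"]),
   ("Canada", ["Canada", "Canadian", "Toronto", "Vancouver", "Montreal", "McGill", "British Columbia", "UBC", "Alberta", "Ontario", "Quebec", "Calgary", "Waterloo", "University of Toronto"])]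

def affiliationToRegion (aff_text : String) : String :=
  if aff_text = "" then "Others"
  else
    let lower := PySem.Str.lower aff_text
    match regionKeywords.findSome? (fun p =>
      if p.2.any (fun kw => PySem.Str.isIn (PySem.Str.lower kw) lower) then some p.1 else none) with
    | some region => region
    | none => "Others"

-- ===== PORT A =====
-- loop bodies of A, named: per-(name,affs) entry, per-record, and per-author finalisation
def aEntry (d : PySem.Dict String (List String)) (p : String × List String) : PySem.Dict String (List String) :=
  if p.1 ≠ "" then d.insert p.1 (d.getD p.1 [] ++ p.2) else d

def aRecord (d : PySem.Dict String (List String)) (rec : List (String × List (String × List String))) : PySem.Dict String (List String) :=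
  ((PySem.Dict.mk rec).getD "author_affiliations" []).foldl aEntry d

def aRegionOf (affs : List String) : String :=
  let regions := (affs.filter (fun a => a ≠ "")).map affiliationToRegion
  let regions := regions.filter (fun r => r ≠ "Others")
  if regions.isEmpty then "Others"
  else
    -- Counter(regions).most_common(1)[0][0]: the first key of maximal count (CPython's nlargest(1) is max)
    match PySem.List.max? (PySem.Dict.counter regions).items (fun q => q.2) with
    | some q => q.1
    | none => ""

def build_author_regions (records : List (List (String × List (String × List String)))) : List (String × String) :=
  let author_affs := records.foldl aRecord PySem.Dict.empty
  (author_affs.items.foldl (fun out p => out.insert p.1 (aRegionOf p.2)) PySem.Dict.empty).items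

-- ===== PORT B =====
-- module-level tables of Source B: _REGION_NAMES = list(_REGION_KEYWORDS), _LOWER_KEYWORDS
def regionNames : List String := regionKeywords.map Prod.fst
def lowerKeywords : List (List String) := regionKeywords.map (fun p => p.2.map PySem.Str.lower)

-- _region_index: index of the region an affiliation votes for, or -1 for no vote
def regionIndex (aff_text : String) : Int :=
  if aff_text = "" then -1
  else
    let lower := PySem.Str.lower aff_text
    match (PySem.List.enumerate lowerKeywords).findSome? (fun q =>
      if q.2.any (fun kw => PySem.Str.isIn kw lower) then some q.1 else none) with
    | some i => i
    | none => -1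

-- per-author tally state: (counts[7], firsts[7], nvotes); all list indices used are in [0,7)
def initSt : List Int × List Int × Int := (List.replicate 7 0, List.replicate 7 0, 0)

-- B's innermost loop body: one affiliation's vote
def bStep (t : List Int × List Int × Int) (a : String) : List Int × List Int × Int :=
  let i := regionIndex a
  if i < 0 then t
  else
    let ci := t.1.getD i.toNat 0
    (t.1.set i.toNat (ci + 1),
     (if ci = 0 then t.2.1.set i.toNat t.2.2 else t.2.1),
     t.2.2 + 1)

-- python mutates the stored 3-list in place; Dict.insert overwrites in place keeping position: same dict
def bEntry (d : PySem.Dict String (List Int × List Int × Int)) (p : String × List String) : PySem.Dict String (List Int × List Int × Int) :=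
  if p.1 ≠ "" then d.insert p.1 (p.2.foldl bStep (d.getD p.1 initSt)) else d

def bRecord (d : PySem.Dict String (List Int × List Int × Int)) (rec : List (String × List (String × List String))) : PySem.Dict String (List Int × List Int × Int) :=
  ((PySem.Dict.mk rec).getD "author_affiliations" []).foldl bEntry d

-- the explicit argmax loop 'for i in range(7)'
def bBest (counts firsts : List Int) : Int :=
  (PySem.List.pyRange 0 7).foldl (fun best i =>
    if counts.getD i.toNat 0 = 0 then best
    else if best < 0 then i
    else if counts.getD best.toNat 0 < counts.getD i.toNat 0 then i
    else if counts.getD i.toNat 0 = counts.getD best.toNat 0 ∧ firsts.getD i.toNat 0 < firsts.getD best.toNat 0 then i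
    else best) (-1)

def bOut (t : List Int × List Int × Int) : String :=
  let best := bBest t.1 t.2.1
  if 0 ≤ best then regionNames.getD best.toNat "" else "Others"

def build_author_regions_alt (records : List (List (String × List (String × List String)))) : List (String × String) :=
  let tallies := records.foldl bRecord PySem.Dict.empty
  (tallies.items.foldl (fun out p => out.insert p.1 (bOut p.2)) PySem.Dict.empty).items

-- ===== PRECONDITION & SPEC =====
-- Pre_ excludes association lists in which some record binds the key "author_affiliations" more than
-- once: such a list encodes no Python dict (dict keys are unique), so first-match lookup there is an
-- artefact of the List (K × V) encoding, not behaviour of A.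
def Pre_build_author_regions (records : List (List (String × List (String × List String)))) : Prop :=
  (records.all (fun rec => (rec.map Prod.fst).count "author_affiliations" ≤ 1)) = true
instance (records : List (List (String × List (String × List String)))) : Decidable (Pre_build_author_regions records) := by unfold Pre_build_author_regions; infer_instance

def pvWitness_build_author_regions : (List (List (String × List (String × List String)))) :=
  [[("author_affiliations", [("Ann", ["Harvard Medical School"]), ("Bo", ["Tsinghua", "Oxford"])])],
   [("author_affiliations", [("Ann", ["Stanford"]), ("", ["Tokyo"])])]]

def Spec_build_author_regions (records : List (List (String × List (String × List String)))) (out : List (String × String)) : Prop := out = build_author_regions_alt records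
instance (records : List (List (String × List (String × List String)))) (out : List (String × String)) : Decidable (Spec_build_author_regions records out) := by unfold Spec_build_author_regions; infer_instance

-- ===== CLAIM (what is proved, stated in full; the proofs are below) =====
def Claim_equal_build_author_regions : Prop := ∀ (records : List (List (String × List (String × List String)))), Dom_build_author_regions records → Pre_build_author_regions records → Spec_build_author_regions records (build_author_regions records)

-- ===== LEMMAS AND PROOFS =====

-- A's filtered region list of one author's affiliations
def regionsOf (affs : List String) : List String :=
  ((affs.filter (fun a => a ≠ "")).map affiliationToRegion).filter (fun r => r ≠ "Others")

-- B's tally state accumulated from one author's affiliation list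
def stateOf (affs : List String) : List Int × List Int × Int := affs.foldl bStep initSt

-- B's counters dict is A's author_affs dict with every value v replaced by stateOf v
def mapv (d : PySem.Dict String (List String)) : PySem.Dict String (List Int × List Int × Int) :=
  PySem.Dict.mk (d.items.map (fun p => (p.1, stateOf p.2)))

lemma get?_mapv (l : List (String × List String)) (k : String) :
    (PySem.Dict.mk (l.map (fun p => (p.1, stateOf p.2)))).get? k
      = Option.map stateOf ((PySem.Dict.mk l).get? k) := by
  induction l with
  | nil => rfl
  | cons p t ih =>
    obtain ⟨k1, v1⟩ := p
    simp only [List.map_cons, PySem.Dict.get?_mk_cons]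
    cases h : (k1 == k) <;> simp [ih]

lemma getD_mapv (d : PySem.Dict String (List String)) (k : String) :
    (mapv d).getD k initSt = stateOf (d.getD k []) := by
  rcases d with ⟨l⟩
  rw [PySem.Dict.getD_eq_get?_getD, PySem.Dict.getD_eq_get?_getD]
  have h : (mapv (PySem.Dict.mk l)).get? k
      = Option.map stateOf ((PySem.Dict.mk l).get? k) := get?_mapv l k
  rw [h]
  cases (PySem.Dict.mk l).get? k <;> rfl

lemma mapv_insert (d : PySem.Dict String (List String)) (k : String) (v : List String) :
    mapv (d.insert k v) = (mapv d).insert k (stateOf v) := by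
  apply PySem.Dict.ext
  have hc : (mapv d).contains k = d.contains k := by
    rcases d with ⟨l⟩
    simp [mapv, PySem.Dict.contains_eq_isSome_get?, get?_mapv]
  rw [PySem.Dict.items_insert, mapv, PySem.Dict.items_insert, hc]
  by_cases h : d.contains k
  · simp [h, mapv]
    intro a b _
    by_cases hp : a = k <;> simp [hp]
  · simp [h, mapv]

lemma bEntry_mapv (d : PySem.Dict String (List String)) (p : String × List String) :
    bEntry (mapv d) p = mapv (aEntry d p) := by
  by_cases h : p.1 = "" <;> simp [bEntry, aEntry, h]
  rw [getD_mapv, mapv_insert]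
  congr 1
  rw [stateOf, stateOf, List.foldl_append]

lemma bRecord_mapv (d : PySem.Dict String (List String)) (rec : List (String × List (String × List String))) :
    bRecord (mapv d) rec = mapv (aRecord d rec) := by
  rw [bRecord, aRecord]
  generalize ((PySem.Dict.mk rec).getD "author_affiliations" []) = l
  induction l generalizing d with
  | nil => rfl
  | cons p t ih => rw [List.foldl_cons, List.foldl_cons, bEntry_mapv, ih]

lemma fold_records_mapv (records : List (List (String × List (String × List String)))) :
    ∀ d, records.foldl bRecord (mapv d) = mapv (records.foldl aRecord d) := by
  induction records with
  | nil => intro d; rfl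
  | cons r t ih => intro d; rw [List.foldl_cons, List.foldl_cons, bRecord_mapv, ih]

-- ---- core: bOut (stateOf affs) = aRegionOf affs ----

-- index-side vote list and elementary step
def ivotes (affs : List String) : List Nat :=
  affs.filterMap (fun a => if regionIndex a < 0 then none else some (regionIndex a).toNat)

def iStep (t : List Int × List Int × Int) (i : Nat) : List Int × List Int × Int :=
  (t.1.set i (t.1.getD i 0 + 1),
   (if t.1.getD i 0 = 0 then t.2.1.set i t.2.2 else t.2.1),
   t.2.2 + 1)

def nm (i : Nat) : String := regionNames.getD i ""

-- classification of one affiliation string by both programs: the two keyword scans agree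
lemma gen (la : String) :
    ∀ (L : List (String × List String)) (start : Int),
      (L.findSome? (fun p => if p.2.any (fun kw => PySem.Str.isIn (PySem.Str.lower kw) la) then some p.1 else none) = none
        ∧ (PySem.List.enumerate (L.map (fun p => p.2.map PySem.Str.lower)) start).findSome? (fun q => if q.2.any (fun kw => PySem.Str.isIn kw la) then some q.1 else none) = none)
      ∨ (∃ k : Nat, k < L.length
          ∧ (PySem.List.enumerate (L.map (fun p => p.2.map PySem.Str.lower)) start).findSome? (fun q => if q.2.any (fun kw => PySem.Str.isIn kw la) then some q.1 else none) = some (start + k)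
          ∧ L.findSome? (fun p => if p.2.any (fun kw => PySem.Str.isIn (PySem.Str.lower kw) la) then some p.1 else none) = some ((L.map Prod.fst).getD k "")) := by
  intro L
  induction L with
  | nil => intro start; left; constructor <;> rfl
  | cons p t ih =>
    intro start
    have hB : ((p.2.map PySem.Str.lower).any (fun kw => PySem.Str.isIn kw la))
        = (p.2.any fun kw => PySem.Str.isIn (PySem.Str.lower kw) la) := by
      rw [List.any_map]; rfl
    by_cases hc : (p.2.any (fun kw => PySem.Str.isIn (PySem.Str.lower kw) la)) = true
    · right
      refine ⟨0, by simp, ?_, ?_⟩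
      · simp only [List.map_cons, PySem.List.enumerate, List.findSome?_cons, hB, hc, if_true]
        simp
      · simp only [List.findSome?_cons, hc, if_true]
        simp
    · have hc' : (p.2.any (fun kw => PySem.Str.isIn (PySem.Str.lower kw) la)) = false := by
        simpa using hc
      rcases ih (start + 1) with ⟨h1, h2⟩ | ⟨k, hk, h1, h2⟩
      · left
        constructor
        · simp only [List.findSome?_cons, hc', if_false, Bool.false_eq_true]
          exact h1
        · simp only [List.map_cons, PySem.List.enumerate, List.findSome?_cons, hB, hc', if_false, Bool.false_eq_true]
          exact h2
      · right
        refine ⟨k + 1, by simpa using hk, ?_, ?_⟩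
        · simp only [List.map_cons, PySem.List.enumerate, List.findSome?_cons, hB, hc', if_false, Bool.false_eq_true]
          rw [show start + 1 + (k:Int) = start + ((k:Nat) + 1 : Nat) by push_cast; ring] at h1
          exact h1
        · simp only [List.findSome?_cons, hc', if_false, Bool.false_eq_true]
          simpa using h2

lemma classify (a : String) :
    (regionIndex a < 0 ∧ (a = "" ∨ affiliationToRegion a = "Others"))
    ∨ (0 ≤ regionIndex a ∧ (regionIndex a).toNat < 7 ∧ a ≠ "" ∧
        affiliationToRegion a = nm (regionIndex a).toNat ∧ affiliationToRegion a ≠ "Others") := by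
  by_cases ha : a = ""
  · left
    simp [regionIndex, ha]
  · rcases gen (PySem.Str.lower a) regionKeywords 0 with ⟨h1, h2⟩ | ⟨k, hk, h1, h2⟩
    · left
      rw [regionIndex, if_neg ha, affiliationToRegion, if_neg ha]
      simp only [show lowerKeywords = regionKeywords.map (fun p => p.2.map PySem.Str.lower) from rfl, h1, h2]
      simp [ha]
    · right
      rw [regionIndex, if_neg ha, affiliationToRegion, if_neg ha]
      simp only [show lowerKeywords = regionKeywords.map (fun p => p.2.map PySem.Str.lower) from rfl, h1, h2]
      have hk7 : k < 7 := by simpa [regionKeywords] using hk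
      have hnm : nm k = (regionKeywords.map Prod.fst).getD k "" := rfl
      have hno : ∀ j, j < 7 → nm j ≠ "Others" := by decide
      refine ⟨by simp, by simp [hk7], ha, ?_, ?_⟩
      · simp [hnm]
      · simpa [hnm] using hno k hk7

lemma stateOf_eq_fold_ivotes (affs : List String) :
    stateOf affs = (ivotes affs).foldl iStep initSt := by
  rw [stateOf]
  generalize initSt = t
  induction affs generalizing t with
  | nil => rfl
  | cons a tl ih =>
    by_cases h : regionIndex a < 0
    · simp only [ivotes, List.filterMap_cons, if_pos h, List.foldl_cons]
      rw [show bStep t a = t by simp [bStep, if_pos h]]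
      exact ih t
    · simp only [ivotes, List.filterMap_cons, if_neg h, List.foldl_cons]
      rw [show bStep t a = iStep t (regionIndex a).toNat by simp [bStep, iStep, if_neg h]]
      exact ih _

lemma regionsOf_eq_map_ivotes (affs : List String) :
    regionsOf affs = (ivotes affs).map nm := by
  induction affs with
  | nil => rfl
  | cons a tl ih =>
    rcases classify a with ⟨h1, h2 | h2⟩ | ⟨h1, _, h2, h3, h4⟩
    · simp only [regionsOf, ivotes, List.filterMap_cons, if_pos h1] at *
      simp [h2]
      simpa [regionsOf, ivotes] using ih
    · simp only [regionsOf, ivotes, List.filterMap_cons, if_pos h1] at *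
      by_cases ha : a = "" <;> simp [ha, h2] <;> simpa [regionsOf, ivotes] using ih
    · simp only [regionsOf, ivotes, List.filterMap_cons, if_neg (by omega : ¬ regionIndex a < 0)] at *
      have h4' : nm (regionIndex a).toNat ≠ "Others" := h3 ▸ h4
      simp [h2, h3, h4']
      simpa [regionsOf, ivotes] using ih

lemma ivotes_lt (affs : List String) : ∀ i ∈ ivotes affs, i < 7 := by
  intro i hi
  rw [ivotes, List.mem_filterMap] at hi
  rcases hi with ⟨a, _, ha⟩
  rcases classify a with ⟨h1, _⟩ | ⟨h1, h7, _⟩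
  · simp [if_pos h1] at ha
  · rw [if_neg (by omega)] at ha
    cases ha
    exact h7

lemma state_char (rs : List Nat) (h7 : ∀ i ∈ rs, i < 7) :
    (rs.foldl iStep initSt).1.length = 7 ∧ (rs.foldl iStep initSt).2.1.length = 7 ∧
    (rs.foldl iStep initSt).2.2 = (rs.length : Int) ∧
    (∀ i, i < 7 → (rs.foldl iStep initSt).1.getD i 0 = (rs.count i : Int)) ∧
    (∀ i, i ∈ rs → (rs.foldl iStep initSt).2.1.getD i 0 = (rs.idxOf i : Int)) := by
  induction rs using List.reverseRecOn with
  | nil =>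
    refine ⟨rfl, rfl, rfl, ?_, ?_⟩
    · intro i hi
      interval_cases i <;> rfl
    · intro i hi; simp at hi
  | append_singleton rs j ih =>
    have h7' : ∀ i ∈ rs, i < 7 := fun i hi => h7 i (by simp [hi])
    have hj7 : j < 7 := h7 j (by simp)
    obtain ⟨hl1, hl2, hn, hc, hf⟩ := ih h7'
    rw [List.foldl_append, List.foldl_cons, List.foldl_nil]
    set st := rs.foldl iStep initSt with hst
    have hcj : st.1.getD j 0 = (rs.count j : Int) := hc j hj7
    refine ⟨by simp [iStep, hl1], ?_, ?_, ?_, ?_⟩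
    · rw [show (iStep st j).2.1 = (if st.1.getD j 0 = 0 then st.2.1.set j st.2.2 else st.2.1) from rfl]
      split <;> simp [hl2]
    · rw [show (iStep st j).2.2 = st.2.2 + 1 from rfl, hn]
      simp only [List.length_append, List.length_cons, List.length_nil]
      push_cast; ring
    · intro i hi
      by_cases hij : i = j
      · subst hij
        rw [show (iStep st i).1 = st.1.set i (st.1.getD i 0 + 1) from rfl]
        rw [List.getD, List.getElem?_set_self (by omega : i < st.1.length), Option.getD_some]
        rw [hcj]
        have hca : List.count i (rs ++ [i]) = List.count i rs + 1 := by simp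
        rw [hca]; push_cast; ring
      · rw [show (iStep st j).1 = st.1.set j (st.1.getD j 0 + 1) from rfl]
        rw [List.getD, List.getElem?_set_ne (by omega : j ≠ i), ← List.getD]
        rw [hc i hi]
        have hca : List.count i (rs ++ [j]) = List.count i rs := by
          have hji : ¬ j = i := fun h => hij h.symm
          simp [List.count_append, hji]
        rw [hca]
    · intro i hi
      by_cases hij : i = j
      · subst hij
        by_cases hmem : i ∈ rs
        · have hz : ¬ st.1.getD i 0 = 0 := by
            rw [hcj]
            have hcnt : rs.count i ≠ 0 := by simp [List.count_eq_zero, hmem]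
            exact_mod_cast hcnt
          rw [show (iStep st i).2.1 = (if st.1.getD i 0 = 0 then st.2.1.set i st.2.2 else st.2.1) from rfl, if_neg hz]
          rw [hf i hmem, List.idxOf_append_of_mem hmem]
        · have hz : st.1.getD i 0 = 0 := by rw [hcj]; simp [List.count_eq_zero, hmem]
          rw [show (iStep st i).2.1 = (if st.1.getD i 0 = 0 then st.2.1.set i st.2.2 else st.2.1) from rfl, if_pos hz]
          rw [List.getD, List.getElem?_set_self (by omega : i < st.2.1.length), Option.getD_some, hn]
          rw [List.idxOf_append, if_neg hmem]
          simp
      · have hmem : i ∈ rs := by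
          rcases List.mem_append.1 hi with h | h
          · exact h
          · simp at h; exact absurd h hij
        rw [show (iStep st j).2.1 = (if st.1.getD j 0 = 0 then st.2.1.set j st.2.2 else st.2.1) from rfl]
        have : ∀ l : List Int, l = st.2.1.set j st.2.2 ∨ l = st.2.1 → l.getD i 0 = st.2.1.getD i 0 := by
          rintro l (rfl | rfl)
          · rw [List.getD, List.getElem?_set_ne (by omega : j ≠ i), ← List.getD]
          · rfl
        rw [this _ (by split <;> simp), hf i hmem, List.idxOf_append_of_mem hmem]

lemma nm_inj : ∀ i < 7, ∀ j < 7, nm i = nm j → i = j := by decide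

lemma idxOf_inj (l : List Nat) (a b : Nat) (ha : a ∈ l) (hb : b ∈ l)
    (h : l.idxOf a = l.idxOf b) : a = b := by
  have h1 := List.getElem_idxOf (List.idxOf_lt_length_of_mem ha)
  have h2 := List.getElem_idxOf (List.idxOf_lt_length_of_mem hb)
  simp [h] at h1; omega

lemma max?_step {α : Type} (xs : List α) (x : α) (key : α → Int) :
    PySem.List.max? (xs ++ [x]) key
      = match PySem.List.max? xs key with
        | none => some x
        | some m0 => if key m0 < key x then some x else some m0 := by
  simp only [PySem.List.max?, List.foldl_append, List.foldl_cons, List.foldl_nil]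
  rfl

lemma max?_first {α : Type} (xs : List α) (key : α → Int) (m : α)
    (h : PySem.List.max? xs key = some m) :
    ∃ pre post, xs = pre ++ m :: post ∧ ∀ y ∈ pre, key y < key m := by
  induction xs using List.reverseRecOn generalizing m with
  | nil => simp [PySem.List.max?] at h
  | append_singleton xs x ih =>
    rw [max?_step] at h
    cases hx : PySem.List.max? xs key with
    | none =>
      rw [hx] at h
      rw [show (match (none : Option α) with | none => some x | some m0' => if key m0' < key x then some x else some m0') = some x from rfl] at h
      cases h
      have hxs : xs = [] := (PySem.List.max?_eq_none_iff xs key).1 hx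
      exact ⟨[], [], by simp [hxs], by simp⟩
    | some m0 =>
      rw [hx] at h
      rw [show (match some m0 with | none => some x | some m0' => if key m0' < key x then some x else some m0') = if key m0 < key x then some x else some m0 from rfl] at h
      by_cases hlt : key m0 < key x
      · rw [if_pos hlt] at h
        cases h
        refine ⟨xs, [], rfl, fun y hy => ?_⟩
        exact lt_of_le_of_lt (PySem.List.max?_isMax hx y hy) hlt
      · rw [if_neg hlt] at h
        cases h
        obtain ⟨pre, post, heq, hpre⟩ := ih _ hx
        exact ⟨pre, post ++ [x], by rw [heq]; simp, hpre⟩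

lemma ofList_append_singleton {α : Type} [BEq α] (rs : List α) (x : α) :
    PySem.Set.ofList (rs ++ [x]) = (PySem.Set.ofList rs).add x := by
  simp [PySem.Set.ofList, List.foldl_append]

lemma pairwise_idxOf (rs : List Nat) :
    (PySem.Set.ofList rs).Pairwise (fun a b => rs.idxOf a < rs.idxOf b) := by
  induction rs using List.reverseRecOn with
  | nil => simp [PySem.Set.ofList]
  | append_singleton rs x ih =>
    rw [ofList_append_singleton, PySem.Set.add]
    have hmem : ∀ a ∈ PySem.Set.ofList rs, a ∈ rs := fun a ha => (PySem.Set.mem_ofList rs a).1 ha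
    by_cases hc : (PySem.Set.ofList rs).contains x = true
    · rw [if_pos hc]
      refine ih.imp_of_mem ?_
      intro a b ha hb hab
      rw [List.idxOf_append_of_mem (hmem a ha), List.idxOf_append_of_mem (hmem b hb)]
      exact hab
    · rw [if_neg hc]
      have hx : x ∉ rs := by
        intro h
        exact hc (by simpa [PySem.Set.contains, List.contains_iff_mem, PySem.Set.mem_ofList] using (PySem.Set.mem_ofList rs x).2 h)
      rw [List.pairwise_append]
      refine ⟨ih.imp_of_mem ?_, by simp, ?_⟩
      · intro a b ha hb hab
        rw [List.idxOf_append_of_mem (hmem a ha), List.idxOf_append_of_mem (hmem b hb)]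
        exact hab
      · intro a ha b hb
        simp at hb; subst hb
        rw [List.idxOf_append_of_mem (hmem a ha), List.idxOf_append, if_neg hx]
        have := List.idxOf_lt_length_of_mem (hmem a ha)
        simp
        omega

lemma ofList_map_nm (rs : List Nat) (h7 : ∀ i ∈ rs, i < 7) :
    PySem.Set.ofList (rs.map nm) = (PySem.Set.ofList rs).map nm := by
  induction rs using List.reverseRecOn with
  | nil => rfl
  | append_singleton rs x ih =>
    have h7' : ∀ i ∈ rs, i < 7 := fun i hi => h7 i (by simp [hi])
    have hx7 : x < 7 := h7 x (by simp)
    rw [List.map_append, List.map_singleton, ofList_append_singleton, ofList_append_singleton,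
      ih h7', PySem.Set.add, PySem.Set.add]
    have hiff : (PySem.Set.contains (List.map nm (PySem.Set.ofList rs)) (nm x) = true) ↔ ((PySem.Set.ofList rs).contains x = true) := by
      simp only [PySem.Set.contains, List.contains_iff_mem]
      constructor
      · intro h
        rcases List.mem_map.1 h with ⟨a, ha, hax⟩
        have ha7 : a < 7 := h7' a ((PySem.Set.mem_ofList rs a).1 ha)
        rwa [nm_inj a ha7 x hx7 hax] at ha
      · intro h
        exact List.mem_map.2 ⟨x, h, rfl⟩
    by_cases hc : (PySem.Set.ofList rs).contains x = true
    · rw [if_pos hc, if_pos (hiff.2 hc)]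
    · rw [if_neg hc, if_neg (fun h => hc (hiff.1 h))]
      simp

lemma count_map_nm (rs : List Nat) (h7 : ∀ i ∈ rs, i < 7) (i : Nat) (hi7 : i < 7) :
    (rs.map nm).count (nm i) = rs.count i := by
  induction rs with
  | nil => rfl
  | cons a t ih =>
    have ha7 : a < 7 := h7 a (by simp)
    have h7' : ∀ j ∈ t, j < 7 := fun j hj => h7 j (by simp [hj])
    rw [List.map_cons, List.count_cons, List.count_cons, ih h7']
    congr 1
    by_cases hai : a = i
    · simp [hai]
    · have hne : ¬ nm a = nm i := fun h => hai (nm_inj a ha7 i hi7 h)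
      simp [hai, hne]

def lstep (counts firsts : List Int) (best : Int) (i : Int) : Int :=
  if counts.getD i.toNat 0 = 0 then best
  else if best < 0 then i
  else if counts.getD best.toNat 0 < counts.getD i.toNat 0 then i
  else if counts.getD i.toNat 0 = counts.getD best.toNat 0 ∧ firsts.getD i.toNat 0 < firsts.getD best.toNat 0 then i
  else best

def LoopInv (rs P : List Nat) (best : Int) : Prop :=
  (best = -1 ∧ ∀ i ∈ P, i ∉ rs) ∨
  (∃ b : Nat, best = (b : Int) ∧ b ∈ P ∧ b ∈ rs ∧ ∀ k ∈ P, k ∈ rs → k ≠ b →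
     (rs.count k < rs.count b ∨ (rs.count k = rs.count b ∧ rs.idxOf b < rs.idxOf k)))

lemma loop_inv (rs : List Nat) (h7 : ∀ i ∈ rs, i < 7) (counts firsts : List Int)
    (hc : ∀ i, i < 7 → counts.getD i 0 = (rs.count i : Int))
    (hf : ∀ i ∈ rs, firsts.getD i 0 = (rs.idxOf i : Int)) :
    ∀ (l P : List Nat), (∀ i ∈ l, i < 7) → (P ++ l).Nodup → ∀ best, LoopInv rs P best →
      LoopInv rs (P ++ l) (l.foldl (fun best n => lstep counts firsts best (n : Int)) best) := by
  intro l
  induction l with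
  | nil => intro P _ _ best hinv; simpa using hinv
  | cons n l' ih =>
    intro P hl hnd best hinv
    have hn7 : n < 7 := hl n (by simp)
    have hl' : ∀ i ∈ l', i < 7 := fun i hi => hl i (by simp [hi])
    have hnP : n ∉ P := fun h => (List.nodup_append.1 hnd).2.2 n h n (by simp) rfl
    have hnd' : ((P ++ [n]) ++ l').Nodup := by
      rw [List.append_assoc]
      simpa using hnd
    have hcn : counts.getD (n : Int).toNat 0 = (rs.count n : Int) := by
      rw [Int.toNat_natCast]; exact hc n hn7
    have hstep : LoopInv rs (P ++ [n]) (lstep counts firsts best (n : Int)) := by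
      rcases hinv with ⟨hb, hnone⟩ | ⟨b, hb, hbP, hbrs, hdom⟩
      · by_cases hmem : n ∈ rs
        · have hcn0 : ¬ counts.getD (n : Int).toNat 0 = 0 := by
            rw [hcn]
            have : rs.count n ≠ 0 := by simp [List.count_eq_zero, hmem]
            exact_mod_cast this
          rw [lstep, if_neg hcn0, if_pos (by rw [hb]; norm_num)]
          right
          refine ⟨n, rfl, by simp, hmem, ?_⟩
          intro k hk hkrs hkn
          rcases List.mem_append.1 hk with h | h
          · exact absurd hkrs (hnone k h)
          · simp at h; exact absurd h hkn
        · have hcn0 : counts.getD (n : Int).toNat 0 = 0 := by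
            rw [hcn]; simp [List.count_eq_zero, hmem]
          rw [lstep, if_pos hcn0]
          left
          refine ⟨hb, ?_⟩
          intro i hi
          rcases List.mem_append.1 hi with h | h
          · exact hnone i h
          · simp at h; subst h; exact hmem
      · have hb7 : b < 7 := h7 b hbrs
        have hcb : counts.getD (b : Int).toNat 0 = (rs.count b : Int) := by
          rw [Int.toNat_natCast]; exact hc b hb7
        have hbneg : ¬ ((b : Int) < 0) := by omega
        have hnb : n ≠ b := fun h => hnP (h ▸ hbP)
        by_cases hmem : n ∈ rs
        · have hcn0 : ¬ counts.getD (n : Int).toNat 0 = 0 := by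
            rw [hcn]
            have : rs.count n ≠ 0 := by simp [List.count_eq_zero, hmem]
            exact_mod_cast this
          have hfb : firsts.getD (b : Int).toNat 0 = (rs.idxOf b : Int) := by
            rw [Int.toNat_natCast]; exact hf b hbrs
          have hfn : firsts.getD (n : Int).toNat 0 = (rs.idxOf n : Int) := by
            rw [Int.toNat_natCast]; exact hf n hmem
          rw [lstep, if_neg hcn0, if_neg (by rw [hb]; exact hbneg), hb]
          by_cases h1 : counts.getD ((b : Int)).toNat 0 < counts.getD ((n : Int)).toNat 0
          · rw [if_pos h1]
            have h1' : rs.count b < rs.count n := by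
              rw [hcb, hcn] at h1
              exact_mod_cast h1
            right
            refine ⟨n, rfl, by simp, hmem, ?_⟩
            intro k hk hkrs hkn
            rcases List.mem_append.1 hk with h | h
            · by_cases hkb : k = b
              · subst hkb; left; exact h1'
              · rcases hdom k h hkrs hkb with hlt | ⟨heq, _⟩
                · left; omega
                · left; omega
            · simp at h; exact absurd h hkn
          · rw [if_neg h1]
            have h1' : ¬ rs.count b < rs.count n := by
              rw [hcb, hcn] at h1
              exact fun h => h1 (by exact_mod_cast h)
            by_cases h2 : counts.getD ((n : Int)).toNat 0 = counts.getD ((b : Int)).toNat 0 ∧ firsts.getD ((n : Int)).toNat 0 < firsts.getD ((b : Int)).toNat 0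
            · rw [if_pos h2]
              obtain ⟨h2c, h2f⟩ := h2
              have h2c' : rs.count n = rs.count b := by
                rw [hcb, hcn] at h2c
                exact_mod_cast h2c
              have h2f' : rs.idxOf n < rs.idxOf b := by
                rw [hfb, hfn] at h2f
                exact_mod_cast h2f
              right
              refine ⟨n, rfl, by simp, hmem, ?_⟩
              intro k hk hkrs hkn
              rcases List.mem_append.1 hk with h | h
              · by_cases hkb : k = b
                · subst hkb; right; exact ⟨h2c'.symm, h2f'⟩
                · rcases hdom k h hkrs hkb with hlt | ⟨heq, hidx⟩
                  · left; omega
                  · right; exact ⟨by omega, by omega⟩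
              · simp at h; exact absurd h hkn
            · rw [if_neg h2]
              right
              refine ⟨b, rfl, by simp [hbP], hbrs, ?_⟩
              intro k hk hkrs hkb
              rcases List.mem_append.1 hk with h | h
              · exact hdom k h hkrs hkb
              · simp at h; subst h
                have h2' : ¬ (rs.count k = rs.count b ∧ rs.idxOf k < rs.idxOf b) := by
                  rintro ⟨hceq, hflt⟩
                  exact h2 ⟨by rw [hcb, hcn]; exact_mod_cast hceq,
                            by rw [hfb, hfn]; exact_mod_cast hflt⟩
                rcases Nat.lt_trichotomy (rs.count k) (rs.count b) with hlt | heq | hgt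
                · left; exact hlt
                · right
                  refine ⟨heq, ?_⟩
                  have hne : rs.idxOf b ≠ rs.idxOf k :=
                    fun h => hkb (idxOf_inj rs b k hbrs hkrs h).symm
                  have hnl : ¬ rs.idxOf k < rs.idxOf b := fun hlt' => h2' ⟨heq, hlt'⟩
                  omega
                · exact absurd hgt h1'
        · have hcn0 : counts.getD (n : Int).toNat 0 = 0 := by
            rw [hcn]; simp [List.count_eq_zero, hmem]
          rw [lstep, if_pos hcn0]
          right
          refine ⟨b, hb, by simp [hbP], hbrs, ?_⟩
          intro k hk hkrs hkb
          rcases List.mem_append.1 hk with h | h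
          · exact hdom k h hkrs hkb
          · simp at h; subst h; exact absurd hkrs hmem
    have := ih (P ++ [n]) hl' hnd' _ hstep
    rw [List.append_assoc] at this
    simpa using this

lemma bBest_spec (rs : List Nat) (h7 : ∀ i ∈ rs, i < 7) (hne : rs ≠ []) (counts firsts : List Int)
    (hc : ∀ i, i < 7 → counts.getD i 0 = (rs.count i : Int))
    (hf : ∀ i ∈ rs, firsts.getD i 0 = (rs.idxOf i : Int)) :
    ∃ b : Nat, bBest counts firsts = (b : Int) ∧ b ∈ rs ∧ ∀ k ∈ rs, k ≠ b →
      (rs.count k < rs.count b ∨ (rs.count k = rs.count b ∧ rs.idxOf b < rs.idxOf k)) := by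
  have hrange : PySem.List.pyRange 0 7 = (List.range 7).map (fun n => (n : Int)) := by decide
  have hfold : bBest counts firsts
      = (List.range 7).foldl (fun best n => lstep counts firsts best (n : Int)) (-1) := by
    rw [bBest, hrange, List.foldl_map]
    rfl
  have hinv := loop_inv rs h7 counts firsts hc hf (List.range 7) []
    (fun i hi => List.mem_range.1 hi) (by simp [List.nodup_range]) (-1) (Or.inl ⟨rfl, by simp⟩)
  rw [List.nil_append] at hinv
  rcases hinv with ⟨hb, hnone⟩ | ⟨b, hb, _, hbrs, hdom⟩
  · obtain ⟨k0, hk0⟩ := List.exists_mem_of_ne_nil _ hne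
    exact absurd hk0 (hnone k0 (List.mem_range.2 (h7 k0 hk0)))
  · refine ⟨b, by rw [hfold]; exact hb, hbrs, ?_⟩
    intro k hk hkb
    exact hdom k (List.mem_range.2 (h7 k hk)) hk hkb

lemma aWinner (rs : List Nat) (h7 : ∀ i ∈ rs, i < 7) (hne : rs ≠ []) :
    ∃ j : Nat, j ∈ rs ∧
      (∀ k ∈ rs, rs.count k ≤ rs.count j) ∧
      (∀ k ∈ rs, k ≠ j → rs.count k = rs.count j → rs.idxOf j < rs.idxOf k) ∧
      (match PySem.List.max? (PySem.Dict.counter (rs.map nm)).items (fun q => q.2) with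
        | some q => q.1 | none => "") = nm j := by
  rw [PySem.Dict.items_counter, ofList_map_nm rs h7]
  set fo := PySem.Set.ofList rs with hfo
  have hmemfo : ∀ a ∈ fo, a ∈ rs := fun a ha => (PySem.Set.mem_ofList rs a).1 ha
  have hmap : (fo.map nm).map (fun k => (k, ((rs.map nm).count k : Int)))
      = fo.map (fun i => (nm i, (rs.count i : Int))) := by
    rw [List.map_map]
    apply List.map_congr_left
    intro a ha
    simp only [Function.comp]
    rw [count_map_nm rs h7 a (h7 a (hmemfo a ha))]
  rw [hmap]
  have hfone : fo ≠ [] := by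
    obtain ⟨k0, hk0⟩ := List.exists_mem_of_ne_nil _ hne
    intro h
    have := (PySem.Set.mem_ofList rs k0).2 hk0
    rw [← hfo, h] at this
    simp at this
  cases hmax : PySem.List.max? (fo.map (fun i => (nm i, (rs.count i : Int)))) (fun q => q.2) with
  | none =>
    have := (PySem.List.max?_eq_none_iff _ _).1 hmax
    simp [hfone] at this
  | some m =>
    have hmemm := PySem.List.max?_mem hmax
    rcases List.mem_map.1 hmemm with ⟨j, hjfo, hjm⟩
    refine ⟨j, hmemfo j hjfo, ?_, ?_, by rw [← hjm]⟩
    · intro k hk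
      have hkfo : k ∈ fo := (PySem.Set.mem_ofList rs k).2 hk
      have hle := PySem.List.max?_isMax hmax _ (List.mem_map.2 ⟨k, hkfo, rfl⟩)
      rw [← hjm] at hle
      simp only at hle
      exact_mod_cast hle
    · intro k hk hkj hkc
      obtain ⟨pre, post, hsplit, hpre⟩ := max?_first _ _ _ hmax
      obtain ⟨l1, l2, hfo2, hm1, hm2⟩ := List.map_eq_append_iff.1 hsplit
      obtain ⟨a, l3, hl2, ham, hm3⟩ := List.map_eq_cons_iff.1 hm2
      have haj : a = j := by
        have ha7 : a < 7 := h7 a (hmemfo a (by rw [hfo2, hl2]; simp))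
        have hj7 : j < 7 := h7 j (hmemfo j hjfo)
        have : nm a = nm j := by
          have h1 : (nm a, (rs.count a : Int)) = m := ham
          have h2 : (nm j, (rs.count j : Int)) = m := hjm
          rw [← h2] at h1
          exact (Prod.mk.injEq _ _ _ _ ▸ h1).1
        exact nm_inj a ha7 j hj7 this
      subst haj
      have hkfo : k ∈ fo := (PySem.Set.mem_ofList rs k).2 hk
      rw [hfo2, hl2] at hkfo
      rcases List.mem_append.1 hkfo with hk1 | hk23
      · exfalso
        have : (nm k, (rs.count k : Int)) ∈ pre := by
          rw [← hm1]
          exact List.mem_map.2 ⟨k, hk1, rfl⟩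
        have hlt := hpre _ this
        rw [← hjm] at hlt
        simp at hlt
        omega
      · rcases List.mem_cons.1 hk23 with hk2 | hk3
        · exact absurd hk2 hkj
        · have hpw := pairwise_idxOf rs
          rw [← hfo, hfo2, hl2] at hpw
          have := ((List.pairwise_append.1 hpw).2.1)
          exact (List.pairwise_cons.1 this).1 k hk3

lemma core (affs : List String) : bOut (stateOf affs) = aRegionOf affs := by
  have hreg : regionsOf affs = (ivotes affs).map nm := regionsOf_eq_map_ivotes affs
  have h7 := ivotes_lt affs
  set rs := ivotes affs with hrs
  have hstate : stateOf affs = rs.foldl iStep initSt := stateOf_eq_fold_ivotes affs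
  have haR : aRegionOf affs
      = (if ((rs.map nm).isEmpty) then "Others"
         else match PySem.List.max? (PySem.Dict.counter (rs.map nm)).items (fun q => q.2) with
              | some q => q.1 | none => "") := by
    simp only [aRegionOf]
    rw [show ((affs.filter (fun a => a ≠ "")).map affiliationToRegion).filter (fun r => r ≠ "Others") = regionsOf affs from rfl, hreg]
  by_cases hne : rs = []
  · rw [hstate, hne, haR, hne]
    simp only [List.foldl_nil, List.map_nil, List.isEmpty_nil, if_true]
    decide
  · obtain ⟨hl1, hl2, hn, hcc, hff⟩ := state_char rs h7
    obtain ⟨b, hbB, hbrs, hdomB⟩ := bBest_spec rs h7 hne (rs.foldl iStep initSt).1 (rs.foldl iStep initSt).2.1 hcc hff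
    obtain ⟨j, hjrs, hmaxc, hminidx, hwin⟩ := aWinner rs h7 hne
    have hbj : b = j := by
      by_cases h : b = j
      · exact h
      · have h1 := hmaxc b hbrs
        rcases hdomB j hjrs (fun hh => h hh.symm) with hlt | ⟨heq, hidx⟩
        · omega
        · have := hminidx b hbrs h heq.symm
          omega
    rw [haR, if_neg (by simp [hne]), hwin, hstate]
    simp only [bOut]
    rw [hbB, if_pos (by positivity), Int.toNat_natCast, hbj]
    rfl

lemma phase2 (l : List (String × List String)) :
    ∀ (out : PySem.Dict String String), (l.map (fun p => (p.1, stateOf p.2))).foldl (fun out p => out.insert p.1 (bOut p.2)) out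
      = l.foldl (fun out p => out.insert p.1 (aRegionOf p.2)) out := by
  induction l with
  | nil => intro out; rfl
  | cons p t ih =>
    intro out
    simp only [List.map_cons, List.foldl_cons]
    rw [core]
    exact ih _

theorem build_author_regions_spec : Claim_equal_build_author_regions := by
  intro records _ _
  rw [Spec_build_author_regions, build_author_regions, build_author_regions_alt]
  have h0 : (PySem.Dict.empty : PySem.Dict String (List Int × List Int × Int)) = mapv PySem.Dict.empty := rfl
  rw [h0, fold_records_mapv]
  rcases hA : records.foldl aRecord PySem.Dict.empty with ⟨l⟩
  simp only [mapv]
  rw [phase2]
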